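-- pv_equiv track=rewrite | github.com/jedward225/VAGEN | vagen/env/spoc/task_loader.py | _map_house_index_to_scene
-- ===== SOURCE A (Python) =====
-- def _map_house_index_to_scene(house_index):
--     """
--     Map SPOC's house_index to AI2-THOR's supported FloorPlan scene range.
--     AI2-THOR supports: FloorPlan1-30, FloorPlan201-230, FloorPlan301-330, FloorPlan401-430
--     """
--     # Define supported ranges
--     supported_ranges = [
--         (1, 30),      # FloorPlan1-30
--         (201, 230),   # FloorPlan201-230
--         (301, 330),   # FloorPlan301-330
--         (401, 430)    # FloorPlan401-430
--     ]
--
--     # If the house_index is already in a supported range, use it directly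
--     scene_id = house_index + 1  # Convert from 0-based to 1-based
--     for start, end in supported_ranges:
--         if start <= scene_id <= end:
--             return scene_id
--
--     # If not in supported range, map to a supported range
--     # Use modulo to cycle through supported ranges
--     total_supported = sum(end - start + 1 for start, end in supported_ranges)
--     mapped_offset = house_index % total_supported
--
--     # Find which range this offset falls into
--     current_offset = 0
--     for start, end in supported_ranges:
--         range_size = end - start + 1
--         if current_offset <= mapped_offset < current_offset + range_size:
--             return start + (mapped_offset - current_offset)
--         current_offset += range_size
--
--     # Fallback to FloorPlan1 if something goes wrong
--     return 1
-- ===== SOURCE B (Python) =====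
-- def _map_house_index_to_scene(house_index):
--     valid = []
--     for start, end in [(1, 30), (201, 230), (301, 330), (401, 430)]:
--         valid.extend(range(start, end + 1))
--     scene_id = house_index + 1
--     if scene_id in valid:
--         return scene_id
--     return valid[house_index % len(valid)]
-- ===== Notes on version B (the rewrite author's own statement) =====
-- stated objective: simpler
-- what changed: Replaces the two early-return scans with their offset accumulator by one precomputed flat table of all supported scene ids: membership decides phase 1 and a single modulo-indexed lookup into the table replaces the offset-accumulation loop.
import Mathlib
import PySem

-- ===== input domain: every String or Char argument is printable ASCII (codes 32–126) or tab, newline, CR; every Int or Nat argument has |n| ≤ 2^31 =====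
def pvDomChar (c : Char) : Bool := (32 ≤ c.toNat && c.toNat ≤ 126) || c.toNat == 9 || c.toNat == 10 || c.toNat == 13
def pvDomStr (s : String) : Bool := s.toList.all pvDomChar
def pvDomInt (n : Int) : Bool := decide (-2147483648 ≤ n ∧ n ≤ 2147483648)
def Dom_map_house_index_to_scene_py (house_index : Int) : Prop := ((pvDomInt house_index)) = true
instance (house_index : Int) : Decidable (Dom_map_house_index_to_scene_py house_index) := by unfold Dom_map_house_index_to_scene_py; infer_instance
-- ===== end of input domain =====

-- B replaces A's two early-return scans (and the offset accumulator) by one flat table of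
-- supported scene ids: membership decides phase 1, a modulo-indexed lookup decides phase 2 (simpler).

-- ===== PORT A =====
def pvRangesA : List (Int × Int) := [(1, 30), (201, 230), (301, 330), (401, 430)]

-- first for-loop with early return: returns some scene on the first range containing it
def pvLoop1 : List (Int × Int) → Int → Option Int
  | [], _ => none
  | (s, e) :: rest, scene =>
    if s ≤ scene ∧ scene ≤ e then some scene else pvLoop1 rest scene

-- second for-loop with early return and the current_offset accumulator
def pvLoop2 : List (Int × Int) → Int → Int → Option Int
  | [], _, _ => none
  | (s, e) :: rest, m, cur =>
    let size := e - s + 1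
    if cur ≤ m ∧ m < cur + size then some (s + (m - cur)) else pvLoop2 rest m (cur + size)

def map_house_index_to_scene_py (house_index : Int) : Int :=
  let scene_id := house_index + 1
  match pvLoop1 pvRangesA scene_id with
  | some r => r
  | none =>
    let total := (pvRangesA.map (fun p => p.2 - p.1 + 1)).sum
    let mapped_offset := PySem.Int.mod house_index total
    match pvLoop2 pvRangesA mapped_offset 0 with
    | some r => r
    | none => 1

-- ===== PORT B =====
-- flat table of all supported scene ids, built by extending over the ranges in order
def pvValid : List Int :=
  [(1, 30), (201, 230), (301, 330), (401, 430)].foldl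
    (fun acc (p : Int × Int) => acc ++ PySem.List.pyRange p.1 (p.2 + 1) 1) []

def map_house_index_to_scene_py_alt (house_index : Int) : Int :=
  let scene_id := house_index + 1
  if pvValid.contains scene_id then scene_id
  else (PySem.List.pyGet? pvValid (PySem.Int.mod house_index (pvValid.length : Int))).getD 0
  -- the index is Python-nonnegative and < len(valid), so the lookup never raises; getD's 0 is unreachable

-- ===== PRECONDITION & SPEC =====
def Spec_map_house_index_to_scene_py (house_index : Int) (out : Int) : Prop := out = map_house_index_to_scene_py_alt house_index
instance (house_index : Int) (out : Int) : Decidable (Spec_map_house_index_to_scene_py house_index out) := by unfold Spec_map_house_index_to_scene_py; infer_instance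

-- ===== CLAIM (what is proved, stated in full; the proofs are below) =====
def Claim_equal_map_house_index_to_scene_py : Prop := ∀ (house_index : Int), Dom_map_house_index_to_scene_py house_index → Spec_map_house_index_to_scene_py house_index (map_house_index_to_scene_py house_index)

-- ===== LEMMAS AND PROOFS =====

def pvInR (x : Int) : Prop :=
  (1 ≤ x ∧ x ≤ 30) ∨ (201 ≤ x ∧ x ≤ 230) ∨ (301 ≤ x ∧ x ≤ 330) ∨ (401 ≤ x ∧ x ≤ 430)

set_option maxRecDepth 8000

lemma pvValid_eq : pvValid =
    PySem.List.pyRange 1 31 1 ++ (PySem.List.pyRange 201 231 1 ++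
      (PySem.List.pyRange 301 331 1 ++ PySem.List.pyRange 401 431 1)) := by decide

lemma mem_pvValid (x : Int) : x ∈ pvValid ↔ pvInR x := by
  rw [pvValid_eq]
  simp only [List.mem_append, PySem.List.mem_pyRange_one, pvInR]
  omega

lemma loop1_some (s : Int) (h : pvInR s) : pvLoop1 pvRangesA s = some s := by
  simp only [pvRangesA, pvLoop1]
  split_ifs <;> first | rfl | (exfalso; unfold pvInR at h; omega)

lemma loop1_none (s : Int) (h : ¬ pvInR s) : pvLoop1 pvRangesA s = none := by
  simp only [pvRangesA, pvLoop1]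
  split_ifs <;> first | rfl | (exfalso; apply h; unfold pvInR; tauto)

lemma contains_true (s : Int) (h : pvInR s) : pvValid.contains s = true := by
  simpa [List.contains_iff_mem] using (mem_pvValid s).mpr h

lemma contains_false (s : Int) (h : ¬ pvInR s) : pvValid.contains s = false := by
  rw [Bool.eq_false_iff]
  intro hc
  exact h ((mem_pvValid s).mp (by simpa [List.contains_iff_mem] using hc))

lemma get_pvValid (m : Int) (h0 : 0 ≤ m) (h1 : m < 120) :
    (PySem.List.pyGet? pvValid m).getD 0 =
      if m < 30 then 1 + m else if m < 60 then 201 + (m - 30)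
      else if m < 90 then 301 + (m - 60) else 401 + (m - 90) := by
  rw [pvValid_eq]
  rw [PySem.List.pyGet?_of_nonneg _ h0]
  simp only [PySem.List.pyRange_one, List.getElem?_append, List.length_map, List.length_range,
    List.getElem?_map]
  split_ifs <;> (try rw [List.getElem?_range (by omega)]) <;> simp_all <;> omega

lemma loop2_get (m : Int) (h0 : 0 ≤ m) (h1 : m < 120) :
    (match pvLoop2 pvRangesA m 0 with | some r => r | none => 1)
      = (PySem.List.pyGet? pvValid m).getD 0 := by
  rw [get_pvValid m h0 h1]
  simp only [pvRangesA, pvLoop2]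
  norm_num
  split_ifs <;> first | rfl | omega

theorem pv_spec_aux (house_index : Int) :
    map_house_index_to_scene_py house_index = map_house_index_to_scene_py_alt house_index := by
  have hlen : (pvValid.length : Int) = 120 := by decide
  have htot : ((pvRangesA.map (fun p => p.2 - p.1 + 1)).sum) = 120 := by decide
  simp only [map_house_index_to_scene_py, map_house_index_to_scene_py_alt, hlen, htot]
  by_cases hc : pvInR (house_index + 1)
  · rw [loop1_some _ hc, contains_true _ hc]
    simp
  · rw [loop1_none _ hc, contains_false _ hc]
    simp only [Bool.false_eq_true, if_false]
    exact loop2_get _ (PySem.Int.mod_nonneg _ (by norm_num)) (PySem.Int.mod_lt _ (by norm_num))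

-- ===== VERDICT (by name: the statement is the Claim_ definition above) =====
theorem map_house_index_to_scene_py_spec : Claim_equal_map_house_index_to_scene_py := by
  intro house_index _
  exact pv_spec_aux house_index
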